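-- pv_equiv track=rewrite | github.com/evg-n/algorithms-yandex-praktikum | sprint_4/l_find_substrings_with_k_occurrences.py | find_all_n_k_substrings
-- ===== SOURCE A (Python) =====
-- from collections import defaultdict
-- from typing import List
--
-- BASE = 1337
--
-- MOD = 10**15 + 7
--
-- def precalculate_powers(q, n, m):
--     pow_storage = [1]
--     for _ in range(n - 1):
--         pow_storage.append((pow_storage[-1] * q) % m)
--     return pow_storage
--
-- def find_all_n_k_substrings(s: str, window_size: int, k: int) -> List[int]:
--     pow_storage = precalculate_powers(BASE, window_size, MOD)
--     cache = defaultdict(int)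
--     cache_start_indexes = {}
--
--     current_hash = 0
--     for i in range(window_size):
--         current_hash = (current_hash * BASE + ord(s[i])) % MOD
--
--     cache[current_hash] += 1
--     cache_start_indexes[current_hash] = 0
--
--     def get_next_hash(prev_hash, x, y):
--         current_hash = (prev_hash - pow_storage[-1] * ord(s[x])) % MOD
--         return (current_hash * BASE + ord(s[y])) % MOD
--
--     for i in range(1, len(s) - window_size + 1):
--         current_hash = get_next_hash(current_hash, i - 1, i + window_size - 1)
--         if current_hash not in cache:
--             cache_start_indexes[current_hash] = i
--
--         cache[current_hash] += 1
--
--     return [cache_start_indexes[key] for key, val in cache.items() if val >= k]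
-- ===== SOURCE B (Python) =====
-- def find_all_n_k_substrings(s, window_size, k):
--     MOD = 10 ** 15 + 7
--
--     def window_hash(i):
--         h = 0
--         for j in range(window_size):
--             h = (h * 1337 + ord(s[i + j])) % MOD
--         return h
--
--     stats = {window_hash(0): (1, 0)}  # hash -> (count, first start index)
--     for i in range(1, len(s) - window_size + 1):
--         h = window_hash(i)
--         if h in stats:
--             cnt, first = stats[h]
--             stats[h] = (cnt + 1, first)
--         else:
--             stats[h] = (1, i)
--     return [first for cnt, first in stats.values() if cnt >= k]
-- ===== Notes on version B (the rewrite author's own statement) =====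
-- stated objective: simpler
-- what changed: B drops A's rolling hash, precomputed power table and the two parallel dicts, and instead recomputes each window's polynomial hash directly (same BASE/MOD Horner evaluation) while maintaining a single dict hash -> (count, first index).
-- intended difference: On window_size = 0 with nonempty s, A rolls a garbage hash across the string and returns an accidental list of (nearly always) all start indices when k <= 1, while B counts the single empty-window hash len(s)+1 times and returns [0] whenever k <= len(s)+1 - the intended answer for a zero-length window. — e.g. on find_all_n_k_substrings("ab", 0, 1): A returns [0, 1, 2], B returns [0]
import Mathlib
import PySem

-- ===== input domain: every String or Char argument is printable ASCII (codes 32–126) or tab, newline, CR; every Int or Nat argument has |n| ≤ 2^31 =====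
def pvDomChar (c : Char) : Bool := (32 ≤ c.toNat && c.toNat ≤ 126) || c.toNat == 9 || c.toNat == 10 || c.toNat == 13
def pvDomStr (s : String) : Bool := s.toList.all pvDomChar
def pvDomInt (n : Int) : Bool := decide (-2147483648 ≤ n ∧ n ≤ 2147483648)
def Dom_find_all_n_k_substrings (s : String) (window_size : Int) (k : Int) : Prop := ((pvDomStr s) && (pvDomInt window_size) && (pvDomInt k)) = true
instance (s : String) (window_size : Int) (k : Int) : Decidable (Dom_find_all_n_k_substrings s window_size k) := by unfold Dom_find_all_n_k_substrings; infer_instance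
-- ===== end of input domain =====

-- B recomputes each window's hash directly (same polynomial hash) and keeps ONE dict hash -> (count, first index)
-- instead of A's rolling hash with a precomputed power table and two separate dicts: simpler, not faster.

-- ===== PORT A =====
def pvBASE : Int := 1337

def pvMOD : Int := 10 ^ 15 + 7

def pvPrecalculatePowers (q : Int) (n : Int) (m : Int) : List Int :=
  (PySem.List.pyRange 0 (n - 1) 1).foldl
    (fun pow_storage _ =>
      pow_storage ++ [PySem.Int.mod (PySem.List.pyGetD pow_storage (-1) 0 * q) m])
    [1]

def find_all_n_k_substrings (s : String) (window_size : Int) (k : Int) : List Int :=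
  let cs := s.toList
  let pow_storage := pvPrecalculatePowers pvBASE window_size pvMOD
  -- current_hash after the first loop (ord(s[i]) is in range under Pre_)
  let current_hash0 :=
    (PySem.List.pyRange 0 window_size 1).foldl
      (fun current_hash i =>
        PySem.Int.mod (current_hash * pvBASE + ((PySem.List.pyGetD cs i 'a').toNat : Int)) pvMOD)
      0
  let cache : PySem.Dict Int Int := (PySem.Dict.empty).modify current_hash0 0 (· + 1)
  let cache_start_indexes : PySem.Dict Int Int := (PySem.Dict.empty).insert current_hash0 0
  let get_next_hash := fun (prev_hash x y : Int) =>
    let ch := PySem.Int.mod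
      (prev_hash - PySem.List.pyGetD pow_storage (-1) 0 * ((PySem.List.pyGetD cs x 'a').toNat : Int)) pvMOD
    PySem.Int.mod (ch * pvBASE + ((PySem.List.pyGetD cs y 'a').toNat : Int)) pvMOD
  let st :=
    (PySem.List.pyRange 1 ((cs.length : Int) - window_size + 1) 1).foldl
      (fun (st : Int × PySem.Dict Int Int × PySem.Dict Int Int) i =>
        let current_hash := get_next_hash st.1 (i - 1) (i + window_size - 1)
        let cache_start_indexes :=
          if st.2.1.contains current_hash then st.2.2 else st.2.2.insert current_hash i
        (current_hash, st.2.1.modify current_hash 0 (· + 1), cache_start_indexes))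
      (current_hash0, cache, cache_start_indexes)
  (st.2.1.items.filter (fun p => decide (k ≤ p.2))).map (fun p => st.2.2.getD p.1 0)

-- ===== PORT B =====
def find_all_n_k_substrings_alt (s : String) (window_size : Int) (k : Int) : List Int :=
  let cs := s.toList
  let window_hash := fun (i : Int) =>
    (PySem.List.pyRange 0 window_size 1).foldl
      (fun h j =>
        PySem.Int.mod (h * 1337 + ((PySem.List.pyGetD cs (i + j) 'a').toNat : Int)) (10 ^ 15 + 7))
      0
  let stats0 : PySem.Dict Int (Int × Int) := PySem.Dict.ofList [(window_hash 0, (1, 0))]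
  let stats :=
    (PySem.List.pyRange 1 ((cs.length : Int) - window_size + 1) 1).foldl
      (fun (stats : PySem.Dict Int (Int × Int)) i =>
        let h := window_hash i
        if stats.contains h then
          let p := stats.getD h (0, 0)
          stats.insert h (p.1 + 1, p.2)
        else
          stats.insert h (1, i))
      stats0
  (stats.values.filter (fun p => decide (k ≤ p.1))).map (fun p => p.2)

-- ===== PRECONDITION & SPEC =====
-- Pre_ excludes exactly the inputs on which A raises IndexError: window_size > len(s) (the initial
-- window read runs past the end) and window_size < 0 (the rolling loop indexes past the end).
def Pre_find_all_n_k_substrings (s : String) (window_size : Int) (k : Int) : Prop :=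
  0 ≤ window_size ∧ window_size ≤ (s.toList.length : Int)

instance (s : String) (window_size : Int) (k : Int) : Decidable (Pre_find_all_n_k_substrings s window_size k) := by
  unfold Pre_find_all_n_k_substrings; infer_instance

def pvWitness_find_all_n_k_substrings : String × Int × Int := ("abcab", 2, 2)

-- On window_size = 0 with a nonempty s, A rolls a garbage hash over every position and returns the
-- accidental list of (nearly always) all start indices when k ≤ 1, while B counts the one empty-window
-- hash len(s)+1 times and returns [0] whenever k ≤ len(s)+1 — B's is the intended answer for a
-- zero-length window (the empty substring occurs at every position, first at index 0).
def D_find_all_n_k_substrings (s : String) (window_size : Int) (k : Int) : Prop :=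
  window_size = 0 ∧ s.toList ≠ []

instance (s : String) (window_size : Int) (k : Int) : Decidable (D_find_all_n_k_substrings s window_size k) := by
  unfold D_find_all_n_k_substrings; infer_instance

def Spec_find_all_n_k_substrings (s : String) (window_size : Int) (k : Int) (out : List Int) : Prop :=
  ¬ D_find_all_n_k_substrings s window_size k → out = find_all_n_k_substrings_alt s window_size k

instance (s : String) (window_size : Int) (k : Int) (out : List Int) : Decidable (Spec_find_all_n_k_substrings s window_size k out) := by
  unfold Spec_find_all_n_k_substrings; infer_instance

def pvDiffWitness_find_all_n_k_substrings : String × Int × Int := ("ab", 0, 1)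

def pvDiffWitnessOut_find_all_n_k_substrings : (List Int) × (List Int) := ([0, 1, 2], [0])

-- ===== CLAIM (what is proved, stated in full; the proofs are below) =====
def Claim_unchanged_find_all_n_k_substrings : Prop := ∀ (s : String) (window_size : Int) (k : Int), Dom_find_all_n_k_substrings s window_size k → Pre_find_all_n_k_substrings s window_size k → Spec_find_all_n_k_substrings s window_size k (find_all_n_k_substrings s window_size k)

def Claim_changed_find_all_n_k_substrings : Prop := Dom_find_all_n_k_substrings (pvDiffWitness_find_all_n_k_substrings.1) (pvDiffWitness_find_all_n_k_substrings.2.1) (pvDiffWitness_find_all_n_k_substrings.2.2) ∧ Pre_find_all_n_k_substrings (pvDiffWitness_find_all_n_k_substrings.1) (pvDiffWitness_find_all_n_k_substrings.2.1) (pvDiffWitness_find_all_n_k_substrings.2.2) ∧ D_find_all_n_k_substrings (pvDiffWitness_find_all_n_k_substrings.1) (pvDiffWitness_find_all_n_k_substrings.2.1) (pvDiffWitness_find_all_n_k_substrings.2.2) ∧ find_all_n_k_substrings (pvDiffWitness_find_all_n_k_substrings.1) (pvDiffWitness_find_all_n_k_substrings.2.1) (pvDiffWitness_find_all_n_k_substrings.2.2)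 = pvDiffWitnessOut_find_all_n_k_substrings.1 ∧ find_all_n_k_substrings_alt (pvDiffWitness_find_all_n_k_substrings.1) (pvDiffWitness_find_all_n_k_substrings.2.1) (pvDiffWitness_find_all_n_k_substrings.2.2) = pvDiffWitnessOut_find_all_n_k_substrings.2 ∧ pvDiffWitnessOut_find_all_n_k_substrings.1 ≠ pvDiffWitnessOut_find_all_n_k_substrings.2

-- ===== LEMMAS AND PROOFS =====

theorem pv_mod_is_emod (x : Int) : PySem.Int.mod x pvMOD = x % pvMOD :=
  PySem.Int.mod_eq_emod_of_pos (by norm_num [pvMOD])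
theorem pv_mhelp (x p q : Int) : ((x % pvMOD) * p + q) % pvMOD = (x * p + q) % pvMOD := by
  conv_lhs => rw [Int.add_emod, Int.mul_emod, Int.emod_emod_of_dvd _ dvd_rfl]
  rw [← Int.mul_emod, ← Int.add_emod]
def pvHStep (h : Int) (c : Char) : Int := PySem.Int.mod (h * 1337 + (c.toNat : Int)) pvMOD
def pvPoly : List Char → Int
  | [] => 0
  | c :: t => (c.toNat : Int) * 1337 ^ t.length + pvPoly t
theorem pv_poly_append (l : List Char) (c : Char) :
    pvPoly (l ++ [c]) = pvPoly l * 1337 + (c.toNat : Int) := by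
  induction l with
  | nil => simp [pvPoly]
  | cons x t ih => simp [pvPoly, ih, List.length_append, pow_succ]; ring
theorem pv_foldl_hstep (cs : List Char) (a : Int) (hne : cs ≠ []) :
    cs.foldl pvHStep a = (a * 1337 ^ cs.length + pvPoly cs) % pvMOD := by
  induction cs generalizing a with
  | nil => exact absurd rfl hne
  | cons c t ih =>
    cases t with
    | nil => simp [pvHStep, pvPoly, pv_mod_is_emod]
    | cons c' t' =>
      rw [List.foldl_cons, ih _ (by simp)]
      show (pvHStep a c * 1337 ^ (c' :: t').length + pvPoly (c' :: t')) % pvMOD = _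
      rw [pvHStep, pv_mod_is_emod, pv_mhelp]
      congr 1
      simp [pvPoly, List.length_cons, pow_succ]
      ring
theorem pv_powers_aux (t : Nat) :
    PySem.List.pyGetD ((List.range t).foldl
      (fun ps (_ : Nat) => ps ++ [PySem.Int.mod (PySem.List.pyGetD ps (-1) 0 * pvBASE) pvMOD]) [1]) (-1) 0
    = 1337 ^ t % pvMOD := by
  induction t with
  | zero =>
    rw [List.range_zero, List.foldl_nil]
    decide
  | succ t ih =>
    rw [List.range_succ, List.foldl_append, List.foldl_cons, List.foldl_nil,
      PySem.List.pyGetD_neg_one_append_singleton, ih, pv_mod_is_emod]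
    have := pv_mhelp (1337 ^ t) 1337 0
    simpa [pow_succ, pvBASE] using this
theorem pv_powers_last (ws : Int) :
    PySem.List.pyGetD (pvPrecalculatePowers pvBASE ws pvMOD) (-1) 0 = 1337 ^ (ws - 1).toNat % pvMOD := by
  rw [pvPrecalculatePowers, PySem.List.pyRange_one, List.foldl_map]
  simp only [Int.sub_zero]
  exact pv_powers_aux (ws - 1).toNat
def pvHorner (cs : List Char) : Int := cs.foldl pvHStep 0
def pvWin (cs : List Char) (ws i : Int) : List Char := (cs.drop i.toNat).take ws.toNat
def pvH (cs : List Char) (ws i : Int) : Int := pvHorner (pvWin cs ws i)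

theorem pv_horner_poly (cs : List Char) (h : cs ≠ []) : pvHorner cs = pvPoly cs % pvMOD := by
  rw [pvHorner, pv_foldl_hstep cs 0 h]; simp

theorem pv_inner_nat (cs : List Char) (d : Char) (w I : Nat) (h : I + w ≤ cs.length) :
    (PySem.List.pyRange 0 (w : Int) 1).foldl
      (fun h j => pvHStep h (PySem.List.pyGetD cs ((I : Int) + j) d)) 0
    = pvHorner ((cs.drop I).take w) := by
  induction w with
  | zero =>
simp [PySem.List.pyRange_one_eq_nil, pvHorner]
  | succ w ih =>
    have hlt : I + w < cs.length := by omega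
    rw [show ((w + 1 : Nat) : Int) = (w : Int) + 1 by push_cast; ring,
      PySem.List.pyRange_one_succ_right (by positivity), List.foldl_append, List.foldl_cons,
      List.foldl_nil, ih (by omega), List.take_add_one]
    have hd : (cs.drop I)[w]? = some cs[I + w] := by
      rw [List.getElem?_drop]
      exact List.getElem?_eq_getElem (by omega)
    rw [hd]
    have hg : PySem.List.pyGetD cs ((I : Int) + (w : Int)) d = cs[I + w] := by
      rw [show ((I : Int) + (w : Int)) = ((I + w : Nat) : Int) by push_cast; ring,
        PySem.List.pyGetD_natCast]
      exact List.getD_eq_getElem _ _ hlt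
    rw [hg]; simp [Option.toList, pvHorner, List.foldl_append]
theorem pv_inner_hash (cs : List Char) (d : Char) (ws i : Int) (h0 : 0 ≤ i) (h1 : 0 ≤ ws)
    (h2 : i + ws ≤ (cs.length : Int)) :
    (PySem.List.pyRange 0 ws 1).foldl
      (fun h j => PySem.Int.mod (h * 1337 + (((PySem.List.pyGetD cs (i + j) d).toNat : Int))) (10 ^ 15 + 7)) 0
    = pvH cs ws i := by
  obtain ⟨I, rfl⟩ : ∃ I : Nat, i = (I : Int) := ⟨i.toNat, (Int.toNat_of_nonneg h0).symm⟩
  obtain ⟨W, rfl⟩ : ∃ W : Nat, ws = (W : Int) := ⟨ws.toNat, (Int.toNat_of_nonneg h1).symm⟩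
  have hn : I + W ≤ cs.length := by exact_mod_cast h2
  have := pv_inner_nat cs d W I hn
  rw [pvH, pvWin, Int.toNat_natCast, Int.toNat_natCast, ← this]
  rfl
theorem pv_roll_step (cs : List Char) (d : Char) (ws i : Int) (h1 : 1 ≤ ws) (hi : 1 ≤ i)
    (h2 : i + ws ≤ (cs.length : Int)) :
    PySem.Int.mod
      ((PySem.Int.mod (pvH cs ws (i - 1) - (1337 ^ (ws - 1).toNat % pvMOD) * ((PySem.List.pyGetD cs (i - 1) d).toNat : Int)) pvMOD) * 1337
        + ((PySem.List.pyGetD cs (i + ws - 1) d).toNat : Int)) pvMOD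
    = pvH cs ws i := by
  obtain ⟨I, rfl⟩ : ∃ I : Nat, i = (I : Int) + 1 :=
    ⟨(i - 1).toNat, by omega⟩
  obtain ⟨w, rfl⟩ : ∃ w : Nat, ws = (w : Int) + 1 :=
    ⟨(ws - 1).toNat, by omega⟩
  have hlen : I + 1 + w + 1 ≤ cs.length := by exact_mod_cast h2
  have hI : I < cs.length := by omega
  have hIw : I + 1 + w < cs.length := by omega
  -- indices
  have hgx : PySem.List.pyGetD cs ((I : Int) + 1 - 1) d = cs[I] := by
    rw [show (I : Int) + 1 - 1 = (I : Int) by ring, PySem.List.pyGetD_natCast]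
    exact List.getD_eq_getElem _ _ hI
  have hgy : PySem.List.pyGetD cs ((I : Int) + 1 + ((w : Int) + 1) - 1) d = cs[I + 1 + w] := by
    rw [show (I : Int) + 1 + ((w : Int) + 1) - 1 = ((I + 1 + w : Nat) : Int) by push_cast; ring,
      PySem.List.pyGetD_natCast]
    exact List.getD_eq_getElem _ _ hIw
  have hexp : ((w : Int) + 1 - 1).toNat = w := by omega
  -- windows
  set rest := (cs.drop (I + 1)).take w with hrest
  have hrl : rest.length = w := by
    simp [hrest, List.length_take, List.length_drop]; omega
  have hwin1 : pvWin cs ((w : Int) + 1) ((I : Int) + 1 - 1) = cs[I] :: rest := by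
    rw [pvWin, show ((I : Int) + 1 - 1).toNat = I by omega, show ((w : Int) + 1).toNat = w + 1 by omega,
      List.drop_eq_getElem_cons hI, List.take_succ_cons]
  have hwin2 : pvWin cs ((w : Int) + 1) ((I : Int) + 1) = rest ++ [cs[I + 1 + w]] := by
    rw [pvWin, show ((I : Int) + 1).toNat = I + 1 by omega, show ((w : Int) + 1).toNat = w + 1 by omega,
      List.take_add_one]
    have : (cs.drop (I + 1))[w]? = some cs[I + 1 + w] := by
      rw [List.getElem?_drop]
      exact List.getElem?_eq_getElem (by omega)
    rw [this]
    rfl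
  rw [hgx, hgy, hexp, pvH, hwin1, pv_horner_poly _ (by simp), pvH, hwin2,
    pv_horner_poly _ (by simp), pv_mod_is_emod, pv_mod_is_emod, pv_poly_append]
  show ((pvPoly (cs[I] :: rest) % pvMOD - 1337 ^ w % pvMOD * (cs[I].toNat : Int)) % pvMOD * 1337 +
      (cs[I + 1 + w].toNat : Int)) % pvMOD = (pvPoly rest * 1337 + (cs[I + 1 + w].toNat : Int)) % pvMOD
  have hsub : (pvPoly (cs[I] :: rest) % pvMOD - 1337 ^ w % pvMOD * (cs[I].toNat : Int)) % pvMOD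
      = pvPoly rest % pvMOD := by
    conv_lhs => rw [Int.sub_emod, Int.emod_emod_of_dvd _ dvd_rfl, Int.mul_emod,
      Int.emod_emod_of_dvd _ dvd_rfl, ← Int.mul_emod, ← Int.sub_emod]
    congr 1
    rw [pvPoly, hrl]
    ring
  rw [hsub, pv_mhelp]
def pvMapVals {ν μ : Type} (f : ν → μ) (d : PySem.Dict Int ν) : PySem.Dict Int μ :=
  PySem.Dict.mk (d.items.map (fun p => (p.1, f p.2)))

theorem pvMapVals_contains {ν μ : Type} (f : ν → μ) (d : PySem.Dict Int ν) (h : Int) :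
    (pvMapVals f d).contains h = d.contains h := by
  simp only [PySem.Dict.contains, pvMapVals, List.any_map]
  rfl

theorem pvMapVals_keys {ν μ : Type} (f : ν → μ) (d : PySem.Dict Int ν) :
    (pvMapVals f d).keys = d.keys := by
  simp [PySem.Dict.keys, pvMapVals, List.map_map, Function.comp]

theorem pvMapVals_get? {ν μ : Type} (f : ν → μ) (d : PySem.Dict Int ν) (h : Int) :
    (pvMapVals f d).get? h = (d.get? h).map f := by
  simp only [PySem.Dict.get?, pvMapVals, List.find?_map, Option.map_map]
  rfl

theorem pvMapVals_insert {ν μ : Type} (f : ν → μ) (d : PySem.Dict Int ν) (h : Int) (v : ν) :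
    pvMapVals f (d.insert h v) = (pvMapVals f d).insert h (f v) := by
  unfold PySem.Dict.insert
  rw [pvMapVals_contains]
  by_cases hc : d.contains h = true
  · simp only [hc, if_true, pvMapVals, List.map_map]
    congr 1
    apply List.map_congr_left
    intro p _
    by_cases hp : p.1 == h <;> simp [hp, Function.comp]
  · simp [hc, pvMapVals]

theorem pv_replace_eq_self {ν : Type} (l : List (Int × ν)) (h : Int) (v : ν)
    (hnd : (l.map Prod.fst).Nodup) (hf : l.find? (fun p => p.1 == h) = some (h, v)) :
    l.map (fun p => if p.1 == h then (h, v) else p) = l := by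
  induction l with
  | nil => simp at hf
  | cons q t ih =>
    by_cases hq : q.1 == h
    · simp only [List.find?_cons, hq] at hf
      have hqh : q.1 = h := by simpa using hq
      have hnd1 : q.1 ∉ List.map Prod.fst t := by
        simp only [List.map_cons, List.nodup_cons] at hnd; exact hnd.1
      have hnotin : ∀ p ∈ t, (p.1 == h) = false := by
        intro p hp
        have hne : p.1 ≠ h := by
          intro hph
          exact hnd1 (by rw [hqh, ← hph]; exact List.mem_map_of_mem hp)
        simpa using hne
      have hf' : q = (h, v) := by injection hf
      subst hf'
      simp only [List.map_cons, hq, if_true]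
      congr 1
      calc t.map _ = t.map id := List.map_congr_left (fun p hp => by simp [hnotin p hp])
        _ = t := List.map_id t
    · simp only [List.find?_cons, hq] at hf
      simp only [List.map_cons, hq, ih (by simp at hnd ⊢; exact hnd.2) hf]
      simp

theorem pv_insert_of_get?_self {ν : Type} (d : PySem.Dict Int ν) (h : Int) (v : ν)
    (hnd : d.keys.Nodup) (hv : d.get? h = some v) : d.insert h v = d := by
  have hc : d.contains h = true := by
    rw [PySem.Dict.contains_eq_isSome_get?, hv]; rfl
  have hfind : d.items.find? (fun p => p.1 == h) = some (h, v) := by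
    unfold PySem.Dict.get? at hv
    obtain ⟨q, hq, hq2⟩ := Option.map_eq_some_iff.mp hv
    have : q.1 = h := by simpa using (List.find?_some hq)
    cases q; simp at hq2 this; subst hq2 this; exact hq
  unfold PySem.Dict.insert
  rw [if_pos hc]
  cases d with
  | mk items =>
    congr 1
    exact pv_replace_eq_self items h v hnd hfind
def pvPairStep (i h : Int) (cst : PySem.Dict Int Int × PySem.Dict Int Int) :
    PySem.Dict Int Int × PySem.Dict Int Int :=
  (cst.1.modify h 0 (· + 1), if cst.1.contains h then cst.2 else cst.2.insert h i)

def pvBStep (i h : Int) (d : PySem.Dict Int (Int × Int)) : PySem.Dict Int (Int × Int) :=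
  if d.contains h then d.insert h ((d.getD h (0, 0)).1 + 1, (d.getD h (0, 0)).2)
  else d.insert h (1, i)

theorem pvBStep_eq_insert (i h : Int) (d : PySem.Dict Int (Int × Int)) :
    pvBStep i h d = d.insert h (if d.contains h then ((d.getD h (0, 0)).1 + 1, (d.getD h (0, 0)).2) else (1, i)) := by
  unfold pvBStep; split_ifs <;> rfl

theorem pvBStep_nodup (i h : Int) (d : PySem.Dict Int (Int × Int)) (hnd : d.keys.Nodup) :
    (pvBStep i h d).keys.Nodup := by
  rw [pvBStep_eq_insert]
  exact PySem.Dict.nodup_keys_insert _ _ _ hnd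

theorem pv_step_sim (i h : Int) (d : PySem.Dict Int (Int × Int)) (hnd : d.keys.Nodup) :
    pvPairStep i h (pvMapVals Prod.fst d, pvMapVals Prod.snd d)
      = (pvMapVals Prod.fst (pvBStep i h d), pvMapVals Prod.snd (pvBStep i h d)) := by
  unfold pvPairStep pvBStep
  by_cases hc : d.contains h = true
  · obtain ⟨p, hp⟩ : ∃ p, d.get? h = some p := by
      rw [PySem.Dict.contains_eq_isSome_get?] at hc
      exact Option.isSome_iff_exists.mp hc
    have hgD : d.getD h (0, 0) = p := by rw [PySem.Dict.getD_eq_get?_getD, hp]; rfl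
    have hc1 : (pvMapVals Prod.fst d).contains h = true := by rw [pvMapVals_contains]; exact hc
    simp only [hc, hc1, if_true, hgD]
    refine Prod.ext ?_ ?_
    · show (pvMapVals Prod.fst d).modify h 0 (· + 1) = _
      rw [PySem.Dict.modify, pvMapVals_insert]
      congr 1
      rw [PySem.Dict.getD_eq_get?_getD, pvMapVals_get?, hp]
      rfl
    · show pvMapVals Prod.snd d = pvMapVals Prod.snd (d.insert h (p.1 + 1, p.2))
      rw [pvMapVals_insert]
      refine (pv_insert_of_get?_self _ h p.2 ?_ ?_).symm
      · rw [pvMapVals_keys]; exact hnd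
      · rw [pvMapVals_get?, hp]; rfl
  · have hc1 : (pvMapVals Prod.fst d).contains h = false := by
      rw [pvMapVals_contains]; simpa using hc
    simp only [hc, hc1, Bool.false_eq_true, if_false]
    refine Prod.ext ?_ ?_
    · show (pvMapVals Prod.fst d).modify h 0 (· + 1) = _
      rw [PySem.Dict.modify, pvMapVals_insert]
      congr 1
      rw [PySem.Dict.getD_eq_get?_getD, pvMapVals_get?,
        (PySem.Dict.get?_eq_none_iff_contains _ _).mpr (by simpa using hc)]
      rfl
    · show (pvMapVals Prod.snd d).insert h i = pvMapVals Prod.snd (d.insert h (1, i))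
      rw [pvMapVals_insert]

theorem pv_sim (l : List Int) (f : Int → Int) :
    ∀ (d : PySem.Dict Int (Int × Int)), d.keys.Nodup →
    l.foldl (fun cst i => pvPairStep i (f i) cst) (pvMapVals Prod.fst d, pvMapVals Prod.snd d)
      = (pvMapVals Prod.fst (l.foldl (fun d i => pvBStep i (f i) d) d),
         pvMapVals Prod.snd (l.foldl (fun d i => pvBStep i (f i) d) d)) := by
  induction l with
  | nil => intro d _; rfl
  | cons x t ih =>
    intro d hnd
    rw [List.foldl_cons, List.foldl_cons, pv_step_sim x (f x) d hnd]
    exact ih _ (pvBStep_nodup x (f x) d hnd)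

theorem pv_fold_nodup (l : List Int) (f : Int → Int) (d : PySem.Dict Int (Int × Int))
    (hnd : d.keys.Nodup) : (l.foldl (fun d i => pvBStep i (f i) d) d).keys.Nodup := by
  induction l generalizing d with
  | nil => exact hnd
  | cons x t ih => exact ih _ (pvBStep_nodup x (f x) d hnd)
theorem pv_fin (k : Int) (S : PySem.Dict Int (Int × Int)) (hnd : S.keys.Nodup) :
    ((pvMapVals Prod.fst S).items.filter (fun p => decide (k ≤ p.2))).map
        (fun p => (pvMapVals Prod.snd S).getD p.1 0)
      = (S.values.filter (fun p => decide (k ≤ p.1))).map (fun p => p.2) := by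
  have hitems : (pvMapVals Prod.fst S).items = S.items.map (fun p => (p.1, p.2.1)) := rfl
  have hvals : S.values = S.items.map (fun p => p.2) := rfl
  rw [hitems, hvals, List.filter_map, List.filter_map, List.map_map, List.map_map]
  apply List.map_congr_left
  intro p hp
  have hpS : p ∈ S.items := List.mem_of_mem_filter hp
  have hmem : (p.1, p.2.2) ∈ (pvMapVals Prod.snd S).items :=
    List.mem_map_of_mem (f := fun q => (q.1, Prod.snd q.2)) hpS
  have hgd := PySem.Dict.getD_of_mem_items (pvMapVals Prod.snd S) hmem (by rw [pvMapVals_keys]; exact hnd) (0 : Int)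
  simp only [Function.comp]
  exact hgd
theorem pv_roll_gen (nh : Int → Int → Int) (H : Int → Int) (X : Int) (t : Nat) :
    ∀ (a : Int), a + t = X →
    (∀ i, a ≤ i → i < X → nh (H (i - 1)) i = H i) →
    ∀ (c st : PySem.Dict Int Int),
    ((PySem.List.pyRange a X 1).foldl
        (fun (stt : Int × PySem.Dict Int Int × PySem.Dict Int Int) i =>
          (nh stt.1 i, (stt.2.1.modify (nh stt.1 i) 0 fun x => x + 1),
            if stt.2.1.contains (nh stt.1 i) = true then stt.2.2 else stt.2.2.insert (nh stt.1 i) i))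
        (H (a - 1), c, st)).2
      = (PySem.List.pyRange a X 1).foldl (fun cst i => pvPairStep i (H i) cst) (c, st) := by
  induction t with
  | zero =>
    intro a ha _ c st
    rw [PySem.List.pyRange_one_eq_nil (by omega), List.foldl_nil, List.foldl_nil]
  | succ t ih =>
    intro a ha hG c st
    have hlt : a < X := by omega
    rw [PySem.List.pyRange_one_cons hlt, List.foldl_cons, List.foldl_cons]
    have hGa : nh (H (a - 1)) a = H a := hG a le_rfl hlt
    simp only [hGa]
    have := ih (a + 1) (by omega) (fun i hi hix => hG i (by omega) hix)
      ((pvPairStep a (H a) (c, st)).1) ((pvPairStep a (H a) (c, st)).2)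
    rw [show a + 1 - 1 = a by ring] at this
    rw [show (H a, PySem.Dict.modify c (H a) 0 (fun x => x + 1),
          if c.contains (H a) = true then st else st.insert (H a) a)
        = (H a, (pvPairStep a (H a) (c, st)).1, (pvPairStep a (H a) (c, st)).2) from rfl, this]

-- ===== main assembly =====
theorem pv_init_hash (cs : List Char) (d : Char) (ws : Int) (h1 : 0 ≤ ws)
    (h2 : ws ≤ (cs.length : Int)) :
    (PySem.List.pyRange 0 ws 1).foldl
      (fun current_hash i =>
        PySem.Int.mod (current_hash * pvBASE + ((PySem.List.pyGetD cs i d).toNat : Int)) pvMOD) 0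
    = pvH cs ws 0 := by
  have := pv_inner_hash cs d ws 0 le_rfl h1 (by omega)
  simp only [zero_add] at this
  rw [← this]
  rfl

theorem pv_main (s : String) (ws k : Int) (h1 : 1 ≤ ws) (h2 : ws ≤ (s.toList.length : Int)) :
    find_all_n_k_substrings s ws k = find_all_n_k_substrings_alt s ws k := by
  simp only [find_all_n_k_substrings, find_all_n_k_substrings_alt]
  rw [pv_powers_last ws, pv_init_hash s.toList 'a' ws (by omega) h2]
  set cs := s.toList with hcs
  set X : Int := (cs.length : Int) - ws + 1 with hX
  have hX1 : 1 ≤ X := by omega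
  -- A: turn the rolling loop into a pure pair loop over the window hashes
  have hroll := pv_roll_gen
    (fun h i => PySem.Int.mod
      (PySem.Int.mod (h - 1337 ^ (ws - 1).toNat % pvMOD * ((PySem.List.pyGetD cs (i - 1) 'a').toNat : Int)) pvMOD * pvBASE
        + ((PySem.List.pyGetD cs (i + ws - 1) 'a').toNat : Int)) pvMOD)
    (fun i => pvH cs ws i) X (X - 1).toNat 1 (by omega)
    (fun i hi hx => pv_roll_step cs 'a' ws i h1 hi (by omega))
    (PySem.Dict.empty.modify (pvH cs ws 0) 0 (fun x => x + 1))
    (PySem.Dict.empty.insert (pvH cs ws 0) 0)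
  rw [show (1 : Int) - 1 = 0 by norm_num] at hroll
  have hsim := hroll.trans (pv_sim (PySem.List.pyRange 1 X 1) (fun i => pvH cs ws i)
    (PySem.Dict.ofList [(pvH cs ws 0, ((1 : Int), (0 : Int)))]) (PySem.Dict.nodup_keys_ofList _))
  simp only [hsim]
  rw [pv_fin k _ (pv_fold_nodup _ _ _ (PySem.Dict.nodup_keys_ofList _))]
  -- B: the seed window's hash, then each loop window's hash, is pvH
  simp only [pv_inner_hash cs 'a' ws 0 le_rfl (by omega) (by omega)]
  have hb : ∀ (d : PySem.Dict Int (Int × Int)) (i : Int), i ∈ PySem.List.pyRange 1 X 1 →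
      (fun (stats : PySem.Dict Int (Int × Int)) i =>
        if stats.contains
            ((PySem.List.pyRange 0 ws 1).foldl
              (fun h j => PySem.Int.mod (h * 1337 + ((PySem.List.pyGetD cs (i + j) 'a').toNat : Int)) (10 ^ 15 + 7)) 0) = true
        then stats.insert
            ((PySem.List.pyRange 0 ws 1).foldl
              (fun h j => PySem.Int.mod (h * 1337 + ((PySem.List.pyGetD cs (i + j) 'a').toNat : Int)) (10 ^ 15 + 7)) 0)
            ((stats.getD
                ((PySem.List.pyRange 0 ws 1).foldl
                  (fun h j => PySem.Int.mod (h * 1337 + ((PySem.List.pyGetD cs (i + j) 'a').toNat : Int)) (10 ^ 15 + 7)) 0)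
                (0, 0)).1 + 1,
              (stats.getD
                ((PySem.List.pyRange 0 ws 1).foldl
                  (fun h j => PySem.Int.mod (h * 1337 + ((PySem.List.pyGetD cs (i + j) 'a').toNat : Int)) (10 ^ 15 + 7)) 0)
                (0, 0)).2)
        else stats.insert
            ((PySem.List.pyRange 0 ws 1).foldl
              (fun h j => PySem.Int.mod (h * 1337 + ((PySem.List.pyGetD cs (i + j) 'a').toNat : Int)) (10 ^ 15 + 7)) 0)
            (1, i)) d i
      = pvBStep i (pvH cs ws i) d := by
    intro d i hi
    have hmem := (PySem.List.mem_pyRange_one).mp hi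
    simp only [pv_inner_hash cs 'a' ws i (by omega) (by omega) (by omega)]
    rfl
  conv_rhs => rw [PySem.List.foldl_congr_mem _ _ _
    (PySem.Dict.ofList [(pvH cs ws 0, ((1 : Int), (0 : Int)))]) hb]

-- the zero-window corner outside D_: an empty string, where both programs return [0] for k ≤ 1 and [] otherwise
theorem pv_empty (s : String) (k : Int) (hnil : s.toList = []) :
    find_all_n_k_substrings s 0 k = find_all_n_k_substrings_alt s 0 k := by
  simp only [find_all_n_k_substrings, find_all_n_k_substrings_alt, hnil]
  norm_num [PySem.List.pyRange_one_eq_nil, (by decide : PySem.List.pyRange 0 1 1 = [0]),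
    PySem.Dict.modify, PySem.Dict.insert, PySem.Dict.getD, PySem.Dict.get?,
    PySem.Dict.contains, PySem.Dict.empty, PySem.Dict.values]
  have hof : (PySem.Dict.ofList [((0 : Int), ((1 : Int), (0 : Int)))]).items
      = [((0 : Int), ((1 : Int), (0 : Int)))] := by decide
  by_cases hk : k ≤ 1 <;> simp [List.filter, hk, hof]

-- ===== VERDICT (by name: the statement is the Claim_ definition above) =====
theorem find_all_n_k_substrings_spec : Claim_unchanged_find_all_n_k_substrings := by
  intro s ws k _ hpre hnd
  rcases hpre with ⟨h0, hlen⟩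
  by_cases hws : ws = 0
  · subst hws
    have hnil : s.toList = [] := by
      by_contra hne
      exact hnd ⟨rfl, hne⟩
    exact pv_empty s k hnil
  · exact pv_main s ws k (by omega) hlen

theorem find_all_n_k_substrings_changed : Claim_changed_find_all_n_k_substrings := by
  unfold Claim_changed_find_all_n_k_substrings
  decide
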